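-- pv_equiv track=rewrite | github.com/tecWang/knowledges-for-cv | 剑指offer/Codes/06_牛牛算数_堆_赫夫曼树.py | build_heffman_tree
-- ===== SOURCE A (Python) =====
-- def build_heffman_tree(a):
--     total = 0
--     while(len(a) != 1):
--         # a.sort(reverse=True)
--         a.sort()
--         # 最小的是左节点，大一点的是右节点
--         lc = a.pop(0)
--         rc = a.pop(0)
--         total += lc + rc
--         a.append(lc + rc)
--
--     return a[0], total # 返回赫夫曼树根节点
-- ===== SOURCE B (Python) =====
-- def build_heffman_tree(a):
--     # Sort once, then maintain sortedness by ordered insertion of each merged sum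
--     # (A re-sorts the whole list on every iteration). Does not mutate `a`.
--     b = sorted(a)
--     total = 0
--     while len(b) > 1:
--         s = b[0] + b[1]
--         total += s
--         rest = b[2:]
--         k = 0
--         while k < len(rest) and rest[k] <= s:
--             k += 1
--         b = rest[:k] + [s] + rest[k:]
--     return b[0], total
-- ===== Notes on version B (the rewrite author's own statement) =====
-- stated objective: alternative
-- what changed: A re-sorts the whole remaining list on every merge iteration (and pops from the front); B sorts the input once and thereafter keeps the list sorted by inserting each merged sum at its ordered position.
import Mathlib
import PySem

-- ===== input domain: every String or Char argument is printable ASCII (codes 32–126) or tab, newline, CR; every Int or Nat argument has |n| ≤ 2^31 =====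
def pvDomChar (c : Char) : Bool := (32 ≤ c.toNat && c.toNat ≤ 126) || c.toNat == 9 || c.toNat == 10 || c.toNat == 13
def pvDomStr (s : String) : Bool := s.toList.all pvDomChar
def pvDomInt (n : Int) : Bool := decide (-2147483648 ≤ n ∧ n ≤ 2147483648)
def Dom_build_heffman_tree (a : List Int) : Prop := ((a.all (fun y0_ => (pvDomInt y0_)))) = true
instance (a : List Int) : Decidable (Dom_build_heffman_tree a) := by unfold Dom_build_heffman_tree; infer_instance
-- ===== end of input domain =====

-- B sorts once and maintains order by ordered insertion instead of re-sorting each iteration.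
-- A mutates its argument in place (sorts/pops/appends); B does not — the equivalence proved here is about the return value only.

-- ===== PORT A =====
-- the Python returns a tuple (root, total); under the task signature it is the two-element list [root, total]
def buildLoopA (l : List Int) (total : Int) : List Int :=
  if l.length = 1 then
    match l with
    | z :: _ => [z, total]
    | [] => []                 -- unreachable under the if-guard
  else
    match _h : PySem.List.sorted l (fun x => x) false with
    | x :: y :: rest => buildLoopA (rest ++ [x + y]) (total + (x + y))
    | _ => []                  -- a.pop(0) raises IndexError (list too short); outside Pre_
termination_by l.length
decreasing_by
  have hl : (PySem.List.sorted l (fun x => x) false).length = l.length :=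
    PySem.List.length_sorted l (fun x => x) false
  rw [_h] at hl
  simp only [List.length_append, List.length_cons, List.length_nil] at *
  omega

def build_heffman_tree (a : List Int) : List Int := buildLoopA a 0

-- ===== PORT B =====
-- port of the inner `while k < len(rest) and rest[k] <= s` scan + `rest[:k] + [s] + rest[k:]`
def insertSorted (s : Int) (rest : List Int) : List Int :=
  rest.takeWhile (fun t => decide (t ≤ s)) ++ s :: rest.dropWhile (fun t => decide (t ≤ s))

-- termination helper for buildLoopB
theorem insertSorted_length (s : Int) (rest : List Int) :
    (insertSorted s rest).length = rest.length + 1 := by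
  unfold insertSorted
  have h := congrArg List.length
    (List.takeWhile_append_dropWhile (p := fun t => decide (t ≤ s)) (l := rest))
  simp only [List.length_append, List.length_cons] at h ⊢
  omega

def buildLoopB (b : List Int) (total : Int) : List Int :=
  match b with
  | x :: y :: rest => buildLoopB (insertSorted (x + y) rest) (total + (x + y))
  | [z] => [z, total]
  | [] => []                  -- b[0] raises IndexError; outside Pre_
termination_by b.length
decreasing_by
  rw [insertSorted_length]
  simp only [List.length_cons]
  omega

def build_heffman_tree_alt (a : List Int) : List Int :=
  buildLoopB (PySem.List.sorted a (fun x => x) false) 0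

-- ===== PRECONDITION & SPEC =====
-- Python A raises IndexError (pop from empty list) on the empty input; B raises there too.
def Pre_build_heffman_tree (a : List Int) : Prop := a ≠ []
instance (a : List Int) : Decidable (Pre_build_heffman_tree a) := by
  unfold Pre_build_heffman_tree; infer_instance
def pvWitness_build_heffman_tree : List Int := [3, 1, 2, 4]

def Spec_build_heffman_tree (a : List Int) (out : List Int) : Prop := out = build_heffman_tree_alt a
instance (a : List Int) (out : List Int) : Decidable (Spec_build_heffman_tree a out) := by unfold Spec_build_heffman_tree; infer_instance

-- ===== CLAIM (what is proved, stated in full; the proofs are below) =====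
def Claim_equal_build_heffman_tree : Prop := ∀ (a : List Int), Dom_build_heffman_tree a → Pre_build_heffman_tree a → Spec_build_heffman_tree a (build_heffman_tree a)

-- ===== LEMMAS AND PROOFS =====

theorem insertSorted_perm (s : Int) (rest : List Int) :
    (insertSorted s rest).Perm (rest ++ [s]) := by
  unfold insertSorted
  refine List.perm_middle.trans ?_
  rw [List.takeWhile_append_dropWhile]
  exact List.perm_append_comm (l₁ := [s]) (l₂ := rest)

theorem insertSorted_pairwise (s : Int) (rest : List Int)
    (h : rest.Pairwise (· ≤ ·)) : (insertSorted s rest).Pairwise (· ≤ ·) := by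
  induction rest with
  | nil => simp [insertSorted]
  | cons t ts ih =>
    rcases List.pairwise_cons.mp h with ⟨ht, hts⟩
    by_cases hle : t ≤ s
    · have heq : insertSorted s (t :: ts) = t :: insertSorted s ts := by
        simp [insertSorted, hle]
      rw [heq, List.pairwise_cons]
      refine ⟨?_, ih hts⟩
      intro b hb
      have hb' : b ∈ ts ++ [s] := (insertSorted_perm s ts).mem_iff.mp hb
      rcases List.mem_append.mp hb' with hbts | hbs
      · exact ht b hbts
      · simp at hbs; omega
    · have heq : insertSorted s (t :: ts) = s :: t :: ts := by
        simp [insertSorted, hle]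
      rw [heq, List.pairwise_cons]
      refine ⟨?_, h⟩
      intro b hb
      rcases List.mem_cons.mp hb with rfl | hbts
      · omega
      · have := ht b hbts; omega

-- the key step: inserting the sum into the (sorted) tail is exactly re-sorting A's new list
theorem sorted_append_eq_insertSorted (s : Int) (rest : List Int)
    (h : rest.Pairwise (· ≤ ·)) :
    PySem.List.sorted (rest ++ [s]) (fun x => x) false = insertSorted s rest :=
  PySem.List.sorted_id_eq_of_perm_of_pairwise (rest ++ [s]) (insertSorted s rest)
    (insertSorted_perm s rest) (insertSorted_pairwise s rest h)

theorem loopAB (n : Nat) : ∀ (l : List Int), l.length = n → ∀ (total : Int),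
    buildLoopA l total = buildLoopB (PySem.List.sorted l (fun x => x) false) total := by
  induction n using Nat.strong_induction_on with
  | _ n ih =>
    intro l hn total
    match hs : PySem.List.sorted l (fun x => x) false with
    | [] =>
      have hl : l = [] := (PySem.List.sorted_eq_nil_iff l (fun x => x) false).mp hs
      subst hl
      rw [buildLoopA.eq_def]
      simp only [List.length_nil, if_neg (by omega : ¬ (0 = 1))]
      rw [show PySem.List.sorted ([] : List Int) (fun x => x) false = [] from hs]
      simp [buildLoopB]
    | [z] =>
      have hl : l = [z] := by
        have hp : l.Perm [z] := by
          have hq := PySem.List.sorted_perm l (fun x => x) false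
          rw [hs] at hq; exact hq.symm
        exact List.perm_singleton.mp hp
      subst hl
      rw [buildLoopA.eq_def]
      simp [buildLoopB]
    | x :: y :: rest =>
      have hlen : l.length = rest.length + 2 := by
        have hL := PySem.List.length_sorted l (fun x : Int => x) false
        rw [hs] at hL; simpa using hL.symm
      have hpw : rest.Pairwise (· ≤ ·) := by
        have hP := PySem.List.sorted_pairwise l (fun x : Int => x)
        rw [hs] at hP
        exact (List.pairwise_cons.mp (List.pairwise_cons.mp hP).2).2
      rw [buildLoopA.eq_def]
      rw [if_neg (by omega : ¬ l.length = 1)]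
      -- reduce the match on the sorted list using hs
      split
      next x' y' rest' h' =>
        rw [hs] at h'
        injection h' with h1 h2
        injection h2 with h2 h3
        subst h1 h2 h3
        have hrec := ih (rest.length + 1) (by omega) (rest ++ [x + y])
          (by simp) (total + (x + y))
        rw [hrec, sorted_append_eq_insertSorted (x + y) rest hpw]
        conv_rhs => rw [buildLoopB.eq_def]
      next h =>
        exact absurd hs (h x y rest)

-- ===== VERDICT (by name: the statement is the Claim_ definition above) =====
theorem build_heffman_tree_spec : Claim_equal_build_heffman_tree := by
  intro a _ _
  unfold Spec_build_heffman_tree build_heffman_tree build_heffman_tree_alt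
  exact loopAB a.length a rfl 0
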